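-- pv_equiv track=rewrite | github.com/DJV512/Advent-of-Code-2017 | Day13/main.py | part2
-- ===== SOURCE A (Python) =====
-- def part2(firewall):
--
--     for delay in range(5000000):
--         correct = True
--         for layer in firewall:
--             if (delay+layer) % ((firewall[layer]*2)-2) == 0:
--                 correct = False
--                 break
--         if correct:
--             return delay
--
--     return f"Delay needs to be higher than {delay}"
-- ===== SOURCE B (Python) =====
-- def part2(firewall):
--     LIMIT = 5000000
--     lo, size = 0, 1024
--     while lo < LIMIT:
--         hi = min(lo + size, LIMIT)
--         blocked = set()
--         for layer, rng in firewall.items():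
--             step = abs(rng * 2 - 2)
--             start = lo + ((-layer - lo) % step)
--             blocked.update(range(start, hi, step))
--         for d in range(lo, hi):
--             if d not in blocked:
--                 return d
--         lo, size = hi, size * 2
--     return f"Delay needs to be higher than {LIMIT - 1}"
-- ===== Notes on version B (the rewrite author's own statement) =====
-- stated objective: alternative
-- what changed: A trial-tests every layer at every single delay 0,1,2,...; B instead sieves: per layer it marks the blocked delays by stepping through the layer's period over doubling blocks and returns the first unmarked delay (each layer costs block/period marks instead of one modulus test per delay); a timing run could not measure this on large inputs, which fall outside Pre_part2.
import Mathlib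
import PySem

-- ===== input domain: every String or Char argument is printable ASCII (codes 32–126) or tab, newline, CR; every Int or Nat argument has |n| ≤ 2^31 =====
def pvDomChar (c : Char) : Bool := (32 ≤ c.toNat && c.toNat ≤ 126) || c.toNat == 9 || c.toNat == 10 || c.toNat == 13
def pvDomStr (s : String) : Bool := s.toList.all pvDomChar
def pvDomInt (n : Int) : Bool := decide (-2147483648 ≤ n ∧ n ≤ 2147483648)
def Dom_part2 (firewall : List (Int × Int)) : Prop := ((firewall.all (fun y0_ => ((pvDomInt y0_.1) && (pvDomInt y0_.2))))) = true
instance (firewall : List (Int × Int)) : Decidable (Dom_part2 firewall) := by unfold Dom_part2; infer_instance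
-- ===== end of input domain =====

-- B replaces A's per-delay trial of every layer by a doubling-block sieve that marks the
-- blocked delays of each layer by stepping through its period; equivalence is about the
-- return value on inputs where A returns an int (see Pre_part2).

-- ===== PORT A =====
-- inner 'for layer in firewall' loop with the 'correct' flag and break
-- ('firewall[layer]' on a key being iterated is that item's value)
def part2Check (delay : Int) : List (Int × Int) → Bool
  | [] => true
  | (layer, r) :: rest =>
    if PySem.Int.mod (delay + layer) (r * 2 - 2) == 0 then false
    else part2Check delay rest

-- outer 'for delay in range(5000000)' loop; Python returns a string when the range is
-- exhausted (not an Int) — that case is outside Pre_part2, the port returns -1 there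
def part2Loop (items : List (Int × Int)) (delay : Int) : Nat → Int
  | 0 => -1
  | fuel + 1 => if part2Check delay items then delay else part2Loop items (delay + 1) fuel

def part2 (firewall : List (Int × Int)) : Int :=
  part2Loop ((PySem.Dict.ofList firewall).items) 0 5000000

-- ===== PORT B =====
-- 'for d in range(lo, hi): if d not in blocked: return d'
def altScan (blocked : PySem.Set Int) : List Int → Option Int
  | [] => none
  | d :: ds => if PySem.Set.contains blocked d then altScan blocked ds else some d

-- 'blocked = set(); for layer, rng in items: blocked.update(range(start, hi, step))'
def altBlocked (items : List (Int × Int)) (lo hi : Int) : PySem.Set Int :=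
  items.foldl
    (fun b p =>
      PySem.Set.update b
        (PySem.List.pyRange (lo + PySem.Int.mod (-p.1 - lo) |p.2 * 2 - 2|) hi |p.2 * 2 - 2|))
    PySem.Set.empty

-- the 'while lo < LIMIT' loop with doubling block size
def altLoop (items : List (Int × Int)) (lo size : Int) (hsize : 0 < size) : Int :=
  if h : lo < 5000000 then
    let hi := min (lo + size) 5000000
    match altScan (altBlocked items lo hi) (PySem.List.pyRange lo hi 1) with
    | some d => d
    | none => altLoop items hi (size * 2) (by omega)
  else -1
  termination_by (5000000 - lo).toNat
  decreasing_by omega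

def part2_alt (firewall : List (Int × Int)) : Int :=
  altLoop ((PySem.Dict.ofList firewall).items) 0 1024 (by norm_num)

-- ===== PRECONDITION & SPEC =====
-- Pre_part2 holds exactly when the Python A returns an int: no layer has range 1 (whose
-- period 2*1-2 = 0 would make '%' raise ZeroDivisionError at any delay that passes all
-- earlier layers), and some delay below A's search bound passes every layer (otherwise A
-- returns a string, not an int).  The search bound 5000000 is capped by the lcm of the
-- layers' periods, which is equivalent because the set of blocked delays is periodic with
-- that lcm; the cap only makes the condition cheaply decidable, it excludes nothing more.
def preBound (firewall : List (Int × Int)) : Nat :=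
  min 5000000 (((PySem.Dict.ofList firewall).items).foldl (fun a p => Nat.lcm a (p.2 * 2 - 2).natAbs) 1)

-- 'delay n passes every layer' (Bool, so that Pre_part2 is evaluable by machine)
def preGoodAt (firewall : List (Int × Int)) (n : Nat) : Bool :=
  (PySem.Dict.ofList firewall).items.all
    (fun p => !(decide ((p.2 * 2 - 2) ∣ ((n : Int) + p.1))))

def Pre_part2 (firewall : List (Int × Int)) : Prop :=
  (∀ p ∈ (PySem.Dict.ofList firewall).items, p.2 ≠ 1) ∧
  ((List.range (preBound firewall)).any (preGoodAt firewall) = true)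
instance (firewall : List (Int × Int)) : Decidable (Pre_part2 firewall) := by
  unfold Pre_part2; infer_instance

def pvWitness_part2 : (List (Int × Int)) := [(0, 3), (1, 2)]

def Spec_part2 (firewall : List (Int × Int)) (out : Int) : Prop := out = part2_alt firewall
instance (firewall : List (Int × Int)) (out : Int) : Decidable (Spec_part2 firewall out) := by
  unfold Spec_part2; infer_instance

-- ===== CLAIM (what is proved, stated in full; the proofs are below) =====
def Claim_equal_part2 : Prop := ∀ (firewall : List (Int × Int)), Dom_part2 firewall → Pre_part2 firewall → Spec_part2 firewall (part2 firewall)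

-- ===== LEMMAS AND PROOFS =====

-- a delay passes all layers: the common specification both loops are reduced to
def pvGood (items : List (Int × Int)) (d : Int) : Bool :=
  items.all (fun p => !(decide ((p.2 * 2 - 2) ∣ (d + p.1))))

theorem part2Check_eq (items : List (Int × Int)) (d : Int) :
    part2Check d items = pvGood items d := by
  induction items with
  | nil => rfl
  | cons p rest ih =>
    obtain ⟨k, r⟩ := p
    have hc : (PySem.Int.mod (d + k) (r * 2 - 2) == 0) = decide ((r * 2 - 2) ∣ (d + k)) := by
      rw [Bool.eq_iff_iff]
      simp only [beq_iff_eq, decide_eq_true_eq]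
      exact PySem.Int.mod_eq_zero_iff_dvd _ _
    rw [part2Check, hc]
    by_cases hdvd : (r * 2 - 2) ∣ (d + k) <;> simp [hdvd, pvGood, ih]

theorem part2Loop_eq_find (items : List (Int × Int)) (d : Int) (fuel : Nat) :
    part2Loop items d fuel =
      ((PySem.List.pyRange d (d + fuel) 1).find? (pvGood items)).getD (-1) := by
  induction fuel generalizing d with
  | zero =>
    rw [show d + ((0:Nat):Int) = d by push_cast; ring, PySem.List.pyRange_one_eq_nil le_rfl]
    rfl
  | succ n ih =>
    rw [PySem.List.pyRange_one_cons (by push_cast; omega : d < d + ((n:Nat) + 1 : Nat))]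
    simp only [part2Loop, List.find?_cons, part2Check_eq]
    by_cases hg : pvGood items d
    · simp [hg]
    · simp only [hg, Bool.false_eq_true, if_false]
      rw [ih (d + 1)]
      congr 2
      push_cast; ring_nf

-- membership in the fold of per-layer Set.update calls
theorem mem_foldl_update (g : (Int × Int) → List Int) (l : List (Int × Int))
    (s : PySem.Set Int) (d : Int) :
    (d ∈ l.foldl (fun b p => PySem.Set.update b (g p)) s) ↔ d ∈ s ∨ ∃ p ∈ l, d ∈ g p := by
  induction l generalizing s with
  | nil => simp
  | cons p rest ih =>
    simp only [List.foldl_cons, ih, PySem.Set.mem_update, List.mem_cons]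
    constructor
    · rintro ((h | h) | ⟨q, hq, hd⟩)
      · exact Or.inl h
      · exact Or.inr ⟨p, Or.inl rfl, h⟩
      · exact Or.inr ⟨q, Or.inr hq, hd⟩
    · rintro (h | ⟨q, (rfl | hq), hd⟩)
      · exact Or.inl (Or.inl h)
      · exact Or.inl (Or.inr hd)
      · exact Or.inr ⟨q, hq, hd⟩

-- one layer's range(start, hi, step) marks exactly the delays in [lo, hi) it catches
theorem mem_layer_range (k r lo hi d : Int) (hr : r ≠ 1) (hlo : lo ≤ d) (hhi : d < hi) :
    (d ∈ PySem.List.pyRange (lo + PySem.Int.mod (-k - lo) |r * 2 - 2|) hi |r * 2 - 2|) ↔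
      (r * 2 - 2) ∣ (d + k) := by
  set s : Int := |r * 2 - 2| with hs
  have hspos : 0 < s := abs_pos.mpr (by omega)
  have hm0 : 0 ≤ PySem.Int.mod (-k - lo) s := PySem.Int.mod_nonneg _ hspos
  have hms : PySem.Int.mod (-k - lo) s < s := PySem.Int.mod_lt _ hspos
  have hqm : PySem.Int.floordiv (-k - lo) s * s + PySem.Int.mod (-k - lo) s = -k - lo :=
    PySem.Int.floordiv_mul_add_mod _ _
  set q : Int := PySem.Int.floordiv (-k - lo) s with hq
  set m : Int := PySem.Int.mod (-k - lo) s with hm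
  rw [PySem.List.mem_pyRange_iff_of_pos hspos d]
  constructor
  · rintro ⟨h1, _, c, hc⟩
    refine (abs_dvd _ _).mp ⟨c - q, ?_⟩
    have : d - (lo + m) = s * c := hc
    nlinarith
  · intro hdvd
    obtain ⟨c, hc⟩ := (abs_dvd (r * 2 - 2) (d + k)).mpr hdvd
    have h1 : d - (lo + m) = s * (c + q) := by nlinarith
    have h2 : -s < s * (c + q) := by omega
    have h3 : (-1 : Int) < c + q := by
      by_contra hcon
      rw [not_lt] at hcon
      nlinarith
    have h4 : 0 ≤ s * (c + q) := mul_nonneg (le_of_lt hspos) (by omega)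
    exact ⟨by omega, hhi, ⟨c + q, h1⟩⟩

theorem mem_altBlocked (items : List (Int × Int)) (lo hi d : Int)
    (hno1 : ∀ p ∈ items, p.2 ≠ 1) (hlo : lo ≤ d) (hhi : d < hi) :
    (d ∈ altBlocked items lo hi) ↔ ∃ p ∈ items, (p.2 * 2 - 2) ∣ (d + p.1) := by
  unfold altBlocked
  rw [mem_foldl_update]
  simp only [PySem.Set.empty, List.not_mem_nil, false_or]
  constructor
  · rintro ⟨p, hp, hd⟩
    exact ⟨p, hp, (mem_layer_range p.1 p.2 lo hi d (hno1 p hp) hlo hhi).mp hd⟩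
  · rintro ⟨p, hp, hd⟩
    exact ⟨p, hp, (mem_layer_range p.1 p.2 lo hi d (hno1 p hp) hlo hhi).mpr hd⟩

theorem altScan_eq_find_of (blocked : PySem.Set Int) (items : List (Int × Int))
    (ds : List Int) (h : ∀ d ∈ ds, (blocked.contains d = true ↔ pvGood items d = false)) :
    altScan blocked ds = ds.find? (pvGood items) := by
  induction ds with
  | nil => rfl
  | cons d ds ih =>
    simp only [altScan, List.find?_cons]
    cases hb : blocked.contains d with
    | true =>
      have hg : pvGood items d = false := (h d List.mem_cons_self).mp hb
      simp [hg, ih (fun x hx => h x (List.mem_cons_of_mem _ hx))]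
    | false =>
      have hg : pvGood items d = true := by
        rcases Bool.eq_false_or_eq_true (pvGood items d) with h0 | h0
        · exact h0
        · exact absurd ((h d List.mem_cons_self).mpr h0)
            (by rw [hb]; exact Bool.false_ne_true)
      simp [hg]

theorem altScan_eq_find (items : List (Int × Int)) (lo hi : Int)
    (hno1 : ∀ p ∈ items, p.2 ≠ 1) :
    altScan (altBlocked items lo hi) (PySem.List.pyRange lo hi 1) =
      (PySem.List.pyRange lo hi 1).find? (pvGood items) := by
  apply altScan_eq_find_of
  intro d hd
  rw [PySem.List.mem_pyRange_one] at hd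
  rw [PySem.Set.contains_iff, mem_altBlocked items lo hi d hno1 hd.1 hd.2]
  unfold pvGood
  simp

theorem altLoop_eq_find (items : List (Int × Int)) (lo size : Int) (hs : 0 < size)
    (hno1 : ∀ p ∈ items, p.2 ≠ 1) (hlo : 0 ≤ lo) :
    altLoop items lo size hs =
      ((PySem.List.pyRange lo 5000000 1).find? (pvGood items)).getD (-1) := by
  revert hlo
  induction lo, size, hs using altLoop.induct items with
  | case1 lo size hs h hi d hscan =>
    intro hlo
    rw [altLoop]
    simp only [dif_pos h]
    rw [hscan]
    have hfind : (PySem.List.pyRange lo (min (lo + size) 5000000) 1).find? (pvGood items) =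
        some d := by
      rw [← altScan_eq_find items lo (min (lo + size) 5000000) hno1]; exact hscan
    rw [PySem.List.pyRange_one_append lo (min (lo + size) 5000000) 5000000 (by omega) (by omega),
      List.find?_append, hfind]
    rfl
  | case2 lo size hs h hi hscan ih =>
    intro hlo
    rw [altLoop]
    simp only [dif_pos h]
    rw [hscan]
    have hfind : (PySem.List.pyRange lo (min (lo + size) 5000000) 1).find? (pvGood items) =
        none := by
      rw [← altScan_eq_find items lo (min (lo + size) 5000000) hno1]; exact hscan
    rw [PySem.List.pyRange_one_append lo (min (lo + size) 5000000) 5000000 (by omega) (by omega),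
      List.find?_append, hfind, Option.none_or]
    exact ih (by omega)
  | case3 lo size hs h =>
    intro hlo
    rw [altLoop]
    simp only [dif_neg h]
    rw [PySem.List.pyRange_one_eq_nil (by omega)]
    rfl

-- ===== VERDICT (by name: the statement is the Claim_ definition above) =====
theorem part2_spec : Claim_equal_part2 := by
  intro fw _ hpre
  unfold Spec_part2
  unfold part2 part2_alt
  rw [part2Loop_eq_find, altLoop_eq_find _ _ _ _ hpre.1 le_rfl]
  norm_num
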